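-- pv_equiv track=rewrite | github.com/IgSit/ASD | ćw8/zad2 universal exit.py | has_uni_exit
-- ===== SOURCE A (Python) =====
-- from collections import deque
--
-- def is_exit(graph, v):
--     return True if sum(graph[v]) == 0 else False
--
-- def has_uni_exit(graph):
--     n = len(graph)
--     candidates = [i for i in range(n) if is_exit(graph, i)]
--     if len(candidates) > 1:
--         return False
--
--     for candidate in candidates:
--         visited = [False] * n
--         queue = deque([])
--
--         visited[candidate] = True
--         queue.append(candidate)
--
--         while queue:
--             u = queue.popleft()
--             for i in range(n):
--                 if graph[i][u] == 1 and not visited[i]: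
--                     visited[i] = True
--                     queue.append(i)
--
--         if sum(visited) == len(visited):  # every point has a path to candidate
--             return True
--     return False
-- ===== SOURCE B (Python) =====
-- def has_uni_exit(graph):
--     n = len(graph)
--     candidates = [i for i in range(n) if sum(graph[i]) == 0]
--     if len(candidates) != 1:
--         return False
--     c = candidates[0]
--     reach = [False] * n
--     reach[c] = True
--     changed = True
--     while changed:
--         changed = False
--         for i in range(n):
--             for u in range(n):
--                 if graph[i][u] == 1 and reach[u] and not reach[i]:
--                     reach[i] = True
--                     changed = True
--     return all(reach)
-- ===== Notes on version B (the rewrite author's own statement) =====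
-- stated objective: alternative
-- what changed: The worklist BFS (deque + visited array, scanning predecessors of each popped vertex once) is replaced by a Gauss-Seidel-style fixpoint relaxation: repeated full sweeps over all pairs (i,u) setting reach[i] when graph[i][u]==1 and reach[u], until a whole sweep changes nothing; the sink-candidate computation and the False guards are kept.
-- outside the precondition, e.g. on has_uni_exit([[0, 0, 0], [5, 9], [3, 2]]): A returns False, B raises IndexError
import Mathlib
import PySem

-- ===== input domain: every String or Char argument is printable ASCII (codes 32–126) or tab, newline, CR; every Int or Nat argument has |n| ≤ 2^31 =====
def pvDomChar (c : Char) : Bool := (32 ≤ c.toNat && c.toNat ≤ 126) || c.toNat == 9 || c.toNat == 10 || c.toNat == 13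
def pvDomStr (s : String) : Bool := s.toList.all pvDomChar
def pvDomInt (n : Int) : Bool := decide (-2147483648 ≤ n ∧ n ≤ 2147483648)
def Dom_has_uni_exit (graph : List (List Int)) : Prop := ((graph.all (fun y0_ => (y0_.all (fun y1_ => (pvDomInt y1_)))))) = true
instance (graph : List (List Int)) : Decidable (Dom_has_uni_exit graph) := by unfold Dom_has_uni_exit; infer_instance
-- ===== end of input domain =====

-- B replaces A's worklist BFS by a sweep-until-stable fixpoint relaxation (objective: alternative, same results).
-- Indexing graph[i][u] is ported with List.getD, exact on the inputs admitted by Pre_ (all indices in range there).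

-- ===== PORT A =====
-- is_exit(graph, v): sum(graph[v]) == 0
def pvIsExit (graph : List (List Int)) (v : Nat) : Bool := (graph.getD v []).sum == 0

-- inner `for i in range(n)` of A's BFS: pushes unvisited predecessors of u
def pvBfsInner (g : List (List Int)) (u : Nat) (visited : List Bool) (queue : List Nat) :
    List Nat → List Bool × List Nat
  | [] => (visited, queue)
  | i :: is =>
    if ((g.getD i []).getD u 0 == 1) && !(visited.getD i false) then
      pvBfsInner g u (visited.set i true) (queue ++ [i]) is
    else
      pvBfsInner g u visited queue is

-- `while queue:` loop; fuel 2*n+1 is enough (each pop shrinks queue.length + 2*(n - #visited))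
def pvBfs (g : List (List Int)) (n : Nat) : Nat → List Bool → List Nat → List Bool
  | _, visited, [] => visited
  | 0, visited, _ :: _ => visited
  | fuel+1, visited, u :: queue =>
    pvBfs g n fuel (pvBfsInner g u visited queue (List.range n)).1
      (pvBfsInner g u visited queue (List.range n)).2

-- sum(visited)
def pvSum (l : List Bool) : Int := (l.map (fun b => if b then (1 : Int) else 0)).sum

-- `for candidate in candidates:` loop
def pvCandLoop (g : List (List Int)) (n : Nat) : List Nat → Bool
  | [] => false
  | c :: rest =>
    let visited := pvBfs g n (2 * n + 1) ((List.replicate n false).set c true) [c]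
    if pvSum visited == (visited.length : Int) then true else pvCandLoop g n rest

def has_uni_exit (graph : List (List Int)) : Bool :=
  let n := graph.length
  let candidates := (List.range n).filter (fun i => pvIsExit graph i)
  if candidates.length > 1 then false
  else pvCandLoop graph n candidates

-- ===== PORT B =====
-- inner `for u in range(n)` of one sweep, for a fixed row i; state = (reach, changed)
def pvRelaxRow (g : List (List Int)) (i : Nat) (st : List Bool × Bool) :
    List Nat → List Bool × Bool
  | [] => st
  | u :: us =>
    if ((g.getD i []).getD u 0 == 1) && (st.1.getD u false) && !(st.1.getD i false) then
      pvRelaxRow g i (st.1.set i true, true) us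
    else
      pvRelaxRow g i st us

-- one full sweep `for i in range(n):`
def pvSweep (g : List (List Int)) (n : Nat) (st : List Bool × Bool) : List Nat → List Bool × Bool
  | [] => st
  | i :: is => pvSweep g n (pvRelaxRow g i st (List.range n)) is

-- `while changed:` loop; fuel n+1 is enough (every changing sweep adds a reached vertex)
def pvFix (g : List (List Int)) (n : Nat) : Nat → List Bool → List Bool
  | 0, reach => reach
  | fuel+1, reach =>
    if (pvSweep g n (reach, false) (List.range n)).2 then
      pvFix g n fuel (pvSweep g n (reach, false) (List.range n)).1
    else (pvSweep g n (reach, false) (List.range n)).1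

def has_uni_exit_alt (graph : List (List Int)) : Bool :=
  let n := graph.length
  let candidates := (List.range n).filter (fun i => (graph.getD i []).sum == 0)
  if candidates.length != 1 then false
  else
    let c := candidates.headD 0
    let reach := pvFix graph n (n + 1) ((List.replicate n false).set c true)
    reach.all id

-- ===== PRECONDITION & SPEC =====
-- Pre_ excludes graphs having exactly one zero-sum row in which some row is shorter than the
-- number of rows: on such inputs the column indexing graph[i][u] can raise IndexError in A's
-- BFS and always would in B's full sweep (and where A happens to return, B raises).
def Pre_has_uni_exit (graph : List (List Int)) : Prop :=
  graph.countP (fun row => row.sum == 0) = 1 → ∀ row ∈ graph, graph.length ≤ row.length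
instance (graph : List (List Int)) : Decidable (Pre_has_uni_exit graph) := by
  unfold Pre_has_uni_exit; infer_instance

def pvWitness_has_uni_exit : List (List Int) := [[0, 1], [0, 0]]

def Spec_has_uni_exit (graph : List (List Int)) (out : Bool) : Prop := out = has_uni_exit_alt graph
instance (graph : List (List Int)) (out : Bool) : Decidable (Spec_has_uni_exit graph out) := by
  unfold Spec_has_uni_exit; infer_instance

-- ===== CLAIM (what is proved, stated in full; the proofs are below) =====
def Claim_equal_has_uni_exit : Prop := ∀ (graph : List (List Int)), Dom_has_uni_exit graph → Pre_has_uni_exit graph → Spec_has_uni_exit graph (has_uni_exit graph)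

-- ===== LEMMAS AND PROOFS =====

-- `T` is closed under taking in-range predecessors (graph[i][u] == 1)
def pvGoodT (g : List (List Int)) (n : Nat) (T : Nat → Prop) : Prop :=
  ∀ i u, i < n → u < n → ((g.getD i []).getD u 0 == 1) = true → T u → T i

-- ---- generic list facts ----
theorem pv_getD_set_true_iff (l : List Bool) (i v : Nat) :
    (l.set i true).getD v false = true ↔ (v = i ∧ i < l.length) ∨ l.getD v false = true := by
  induction l generalizing i v with
  | nil => simp
  | cons b t ih =>
    cases i with
    | zero =>
      cases v with
      | zero => simp
      | succ v => simp
    | succ i =>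
      cases v with
      | zero => simp
      | succ v => simpa [Nat.succ_lt_succ_iff] using ih i v

theorem pv_getD_replicate (n v : Nat) : (List.replicate n false).getD v false = false := by
  simp [List.getD_eq_getElem?_getD, List.getElem?_replicate]
  split <;> simp

theorem pv_cnt_set_le (l : List Bool) (i : Nat) : l.count true ≤ (l.set i true).count true := by
  induction l generalizing i with
  | nil => simp
  | cons b t ih =>
    cases i with
    | zero => cases b <;> simp
    | succ i => cases b <;> simp only [List.count_cons] <;> simp [ih i]

theorem pv_cnt_set_eq (l : List Bool) (i : Nat) (hi : i < l.length)
    (h : l.getD i false = false) : (l.set i true).count true = l.count true + 1 := by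
  induction l generalizing i with
  | nil => simp at hi
  | cons b t ih =>
    cases i with
    | zero =>
      have hb : b = false := by simpa using h
      subst hb; simp
    | succ i =>
      have h' : t.getD i false = false := by simpa using h
      have hi' : i < t.length := by simpa [Nat.succ_lt_succ_iff] using hi
      cases b <;> simp only [List.count_cons] <;> simp [ih i hi' h']

theorem pv_cnt_full (l : List Bool) (h : l.length ≤ l.count true) (v : Nat) (hv : v < l.length) :
    l.getD v false = true := by
  have hcount : l.count true = l.length :=
    le_antisymm (List.count_le_length) h
  have hall := List.count_eq_length.mp hcount
  rw [List.getD_eq_getElem l false hv]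
  exact (hall _ (List.getElem_mem hv)).symm

theorem pvSum_eq_all (l : List Bool) : (pvSum l == (l.length : Int)) = l.all id := by
  have hcnt : ∀ m : List Bool, pvSum m = (m.count true : Int) := by
    intro m
    induction m with
    | nil => simp [pvSum]
    | cons b t ih =>
      cases b <;> simp [pvSum] at ih ⊢ <;> omega
  rw [hcnt]
  cases hall : l.all id with
  | false =>
    rw [beq_eq_false_iff_ne]
    intro hEq
    have hEq' : l.count true = l.length := by exact_mod_cast hEq
    have hAll := List.count_eq_length.mp hEq'
    have : l.all id = true := List.all_eq_true.mpr (fun x hx => (hAll x hx).symm)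
    rw [hall] at this
    exact Bool.false_ne_true this
  | true =>
    rw [beq_iff_eq]
    have := List.all_eq_true.mp hall
    have hEq : l.count true = l.length := List.count_eq_length.mpr (fun x hx => (this x hx).symm)
    exact_mod_cast hEq

-- ---- A's inner loop ----
theorem innerA_len (g : List (List Int)) (u : Nat) :
    ∀ (is : List Nat) (vis : List Bool) (q : List Nat),
      (pvBfsInner g u vis q is).1.length = vis.length := by
  intro is
  induction is with
  | nil => intro vis q; simp [pvBfsInner]
  | cons i is ih =>
    intro vis q
    by_cases hc : (((g.getD i []).getD u 0 == 1) && !(vis.getD i false)) = true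
    · rw [pvBfsInner, if_pos hc, ih]; simp
    · rw [pvBfsInner, if_neg hc]; exact ih _ _

theorem innerA_mono (g : List (List Int)) (u : Nat) :
    ∀ (is : List Nat) (vis : List Bool) (q : List Nat) (v : Nat),
      vis.getD v false = true → (pvBfsInner g u vis q is).1.getD v false = true := by
  intro is
  induction is with
  | nil => intro vis q v h; simpa [pvBfsInner] using h
  | cons i is ih =>
    intro vis q v h
    by_cases hc : (((g.getD i []).getD u 0 == 1) && !(vis.getD i false)) = true
    · rw [pvBfsInner, if_pos hc]
      exact ih _ _ _ ((pv_getD_set_true_iff _ _ _).mpr (Or.inr h))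
    · rw [pvBfsInner, if_neg hc]; exact ih _ _ _ h

theorem innerA_queue_prefix (g : List (List Int)) (u : Nat) :
    ∀ (is : List Nat) (vis : List Bool) (q : List Nat),
      ∃ ext, (pvBfsInner g u vis q is).2 = q ++ ext := by
  intro is
  induction is with
  | nil => intro vis q; exact ⟨[], by simp [pvBfsInner]⟩
  | cons i is ih =>
    intro vis q
    by_cases hc : (((g.getD i []).getD u 0 == 1) && !(vis.getD i false)) = true
    · rw [pvBfsInner, if_pos hc]
      obtain ⟨ext, hext⟩ := ih (vis.set i true) (q ++ [i])
      exact ⟨i :: ext, by simp [hext]⟩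
    · rw [pvBfsInner, if_neg hc]; exact ih _ _

theorem innerA_queue_sub (g : List (List Int)) (u : Nat) :
    ∀ (is : List Nat) (vis : List Bool) (q : List Nat) (x : Nat),
      x ∈ (pvBfsInner g u vis q is).2 → x ∈ q ∨ x ∈ is := by
  intro is
  induction is with
  | nil => intro vis q x h; simp [pvBfsInner] at h; exact Or.inl h
  | cons i is ih =>
    intro vis q x h
    by_cases hc : (((g.getD i []).getD u 0 == 1) && !(vis.getD i false)) = true
    · rw [pvBfsInner, if_pos hc] at h
      rcases ih _ _ _ h with h' | h'
      · rcases List.mem_append.mp h' with h'' | h''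
        · exact Or.inl h''
        · have hx : x = i := by simpa using h''
          exact Or.inr (by simp [hx])
      · exact Or.inr (by simp [h'])
    · rw [pvBfsInner, if_neg hc] at h
      rcases ih _ _ _ h with h' | h'
      · exact Or.inl h'
      · exact Or.inr (by simp [h'])

theorem innerA_queue_vis (g : List (List Int)) (u : Nat) :
    ∀ (is : List Nat) (vis : List Bool) (q : List Nat),
      (∀ i ∈ is, i < vis.length) → (∀ x ∈ q, vis.getD x false = true) →
      ∀ x ∈ (pvBfsInner g u vis q is).2, (pvBfsInner g u vis q is).1.getD x false = true := by
  intro is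
  induction is with
  | nil => intro vis q _ hq x hx; simp [pvBfsInner] at hx ⊢; exact hq x hx
  | cons i is ih =>
    intro vis q hlen hq x hx
    by_cases hc : (((g.getD i []).getD u 0 == 1) && !(vis.getD i false)) = true
    · rw [pvBfsInner, if_pos hc] at hx ⊢
      refine ih _ _ (fun j hj => by simpa [List.length_set] using hlen j (by simp [hj])) ?_ x hx
      intro y hy
      rcases List.mem_append.mp hy with h' | h'
      · exact (pv_getD_set_true_iff _ _ _).mpr (Or.inr (hq y h'))
      · have hy' : y = i := by simpa using h'
        exact (pv_getD_set_true_iff _ _ _).mpr (Or.inl ⟨hy', hlen i (by simp)⟩)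
    · rw [pvBfsInner, if_neg hc] at hx ⊢
      exact ih _ _ (fun j hj => hlen j (by simp [hj])) hq x hx

theorem innerA_new_in_queue (g : List (List Int)) (u : Nat) :
    ∀ (is : List Nat) (vis : List Bool) (q : List Nat) (v : Nat),
      (pvBfsInner g u vis q is).1.getD v false = true →
      vis.getD v false = true ∨ v ∈ (pvBfsInner g u vis q is).2 := by
  intro is
  induction is with
  | nil => intro vis q v h; simp [pvBfsInner] at h ⊢; exact Or.inl h
  | cons i is ih =>
    intro vis q v h
    by_cases hc : (((g.getD i []).getD u 0 == 1) && !(vis.getD i false)) = true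
    · rw [pvBfsInner, if_pos hc] at h ⊢
      rcases ih _ _ _ h with h' | h'
      · rcases (pv_getD_set_true_iff _ _ _).mp h' with ⟨hv, _⟩ | h''
        · subst hv
          obtain ⟨ext, hext⟩ := innerA_queue_prefix g u is (vis.set v true) (q ++ [v])
          exact Or.inr (by rw [hext]; simp)
        · exact Or.inl h''
      · exact Or.inr h'
    · rw [pvBfsInner, if_neg hc] at h ⊢
      exact ih _ _ _ h

theorem innerA_closes (g : List (List Int)) (u : Nat) :
    ∀ (is : List Nat) (vis : List Bool) (q : List Nat),
      (∀ i ∈ is, i < vis.length) →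
      ∀ i ∈ is, ((g.getD i []).getD u 0 == 1) = true →
        (pvBfsInner g u vis q is).1.getD i false = true := by
  intro is
  induction is with
  | nil => intro vis q _ i hi; simp at hi
  | cons j is ih =>
    intro vis q hlen i hi hE
    rcases List.mem_cons.mp hi with hij | hmem
    · subst hij
      by_cases hv : vis.getD i false = true
      · by_cases hc : (((g.getD i []).getD u 0 == 1) && !(vis.getD i false)) = true
        · rw [pvBfsInner, if_pos hc]
          exact innerA_mono g u _ _ _ _ ((pv_getD_set_true_iff _ _ _).mpr (Or.inr hv))
        · rw [pvBfsInner, if_neg hc]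
          exact innerA_mono g u _ _ _ _ hv
      · have hvf : vis.getD i false = false := Bool.not_eq_true _ ▸ hv
        have hc : (((g.getD i []).getD u 0 == 1) && !(vis.getD i false)) = true := by
          rw [Bool.and_eq_true]
          exact ⟨hE, by simpa [List.getD] using hvf⟩
        rw [pvBfsInner, if_pos hc]
        exact innerA_mono g u _ _ _ _
          ((pv_getD_set_true_iff _ _ _).mpr (Or.inl ⟨rfl, hlen i (by simp)⟩))
    · by_cases hc : (((g.getD j []).getD u 0 == 1) && !(vis.getD j false)) = true
      · rw [pvBfsInner, if_pos hc]
        exact ih _ _ (fun k hk => by simpa [List.length_set] using hlen k (by simp [hk])) i hmem hE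
      · rw [pvBfsInner, if_neg hc]
        exact ih _ _ (fun k hk => hlen k (by simp [hk])) i hmem hE

theorem innerA_sound (g : List (List Int)) (u : Nat) :
    ∀ (is : List Nat) (vis : List Bool) (q : List Nat) (T : Nat → Prop),
      (∀ i ∈ is, ((g.getD i []).getD u 0 == 1) = true → T i) →
      (∀ v, vis.getD v false = true → T v) →
      ∀ v, (pvBfsInner g u vis q is).1.getD v false = true → T v := by
  intro is
  induction is with
  | nil => intro vis q T _ hvis v h; simp [pvBfsInner] at h; exact hvis v h
  | cons i is ih =>
    intro vis q T hT hvis v h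
    by_cases hc : (((g.getD i []).getD u 0 == 1) && !(vis.getD i false)) = true
    · rw [pvBfsInner, if_pos hc] at h
      have hE : ((g.getD i []).getD u 0 == 1) = true := (Bool.and_eq_true _ _ ▸ hc).1
      refine ih _ _ T (fun j hj hEj => hT j (by simp [hj]) hEj) ?_ v h
      intro w hw
      rcases (pv_getD_set_true_iff _ _ _).mp hw with ⟨hv, _⟩ | h''
      · subst hv; exact hT w (by simp) hE
      · exact hvis w h''
    · rw [pvBfsInner, if_neg hc] at h
      exact ih _ _ T (fun j hj hEj => hT j (by simp [hj]) hEj) hvis v h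

theorem innerA_count (g : List (List Int)) (u : Nat) :
    ∀ (is : List Nat) (vis : List Bool) (q : List Nat),
      (∀ i ∈ is, i < vis.length) →
      (pvBfsInner g u vis q is).2.length + vis.count true
        = q.length + (pvBfsInner g u vis q is).1.count true := by
  intro is
  induction is with
  | nil => intro vis q _; simp [pvBfsInner]
  | cons i is ih =>
    intro vis q hlen
    by_cases hc : (((g.getD i []).getD u 0 == 1) && !(vis.getD i false)) = true
    · rw [pvBfsInner, if_pos hc]
      have hfalse : vis.getD i false = false := by
        have := (Bool.and_eq_true _ _ ▸ hc).2
        simpa using this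
      have hcnt := pv_cnt_set_eq vis i (hlen i (by simp)) hfalse
      have h2 := ih (vis.set i true) (q ++ [i])
        (fun k hk => by simpa [List.length_set] using hlen k (by simp [hk]))
      rw [hcnt] at h2
      rw [List.length_append] at h2
      simp only [List.length_singleton] at h2
      omega
    · rw [pvBfsInner, if_neg hc]
      exact ih vis q (fun k hk => hlen k (by simp [hk]))

-- ---- A's BFS loop ----
theorem bfsA_len (g : List (List Int)) (n : Nat) :
    ∀ (fuel : Nat) (vis : List Bool) (q : List Nat),
      (pvBfs g n fuel vis q).length = vis.length := by
  intro fuel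
  induction fuel with
  | zero => intro vis q; cases q <;> simp [pvBfs]
  | succ fuel ih =>
    intro vis q
    cases q with
    | nil => simp [pvBfs]
    | cons u rest =>
      rw [pvBfs, ih, innerA_len]

theorem bfsA_mono (g : List (List Int)) (n : Nat) :
    ∀ (fuel : Nat) (vis : List Bool) (q : List Nat) (v : Nat),
      vis.getD v false = true → (pvBfs g n fuel vis q).getD v false = true := by
  intro fuel
  induction fuel with
  | zero => intro vis q v h; cases q <;> simpa [pvBfs] using h
  | succ fuel ih =>
    intro vis q v h
    cases q with
    | nil => simpa [pvBfs] using h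
    | cons u rest =>
      rw [pvBfs]
      exact ih _ _ _ (innerA_mono g u _ _ _ _ h)

theorem bfsA_sound (g : List (List Int)) (n : Nat) :
    ∀ (fuel : Nat) (vis : List Bool) (q : List Nat) (T : Nat → Prop),
      pvGoodT g n T → vis.length = n →
      (∀ x ∈ q, x < n ∧ vis.getD x false = true) →
      (∀ v, vis.getD v false = true → T v) →
      ∀ v, (pvBfs g n fuel vis q).getD v false = true → T v := by
  intro fuel
  induction fuel with
  | zero =>
    intro vis q T _ _ _ hvis v hv
    cases q <;> simp [pvBfs] at hv <;> exact hvis v hv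
  | succ fuel ih =>
    intro vis q T hGood hlen hq hvis v hv
    cases q with
    | nil => simp [pvBfs] at hv; exact hvis v hv
    | cons u rest =>
      rw [pvBfs] at hv
      have hun : u < n := (hq u (by simp)).1
      have hTu : T u := hvis u (hq u (by simp)).2
      have hrange : ∀ i ∈ List.range n, i < vis.length := by simp [hlen]
      have hrq : ∀ y ∈ rest, vis.getD y false = true := fun y hy => (hq y (by simp [hy])).2
      have hsnd : ∀ w, (pvBfsInner g u vis rest (List.range n)).1.getD w false = true → T w :=
        innerA_sound g u _ _ _ T
          (fun i hi hE => hGood i u (List.mem_range.mp hi) hun hE hTu) hvis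
      refine ih _ _ T hGood (by rw [innerA_len]; exact hlen) ?_ hsnd v hv
      intro x hx
      refine ⟨?_, innerA_queue_vis g u _ _ _ hrange hrq x hx⟩
      rcases innerA_queue_sub g u _ _ _ x hx with h' | h'
      · exact (hq x (by simp [h'])).1
      · exact List.mem_range.mp h'

theorem bfsA_closed (g : List (List Int)) (n : Nat) :
    ∀ (fuel : Nat) (vis : List Bool) (q : List Nat),
      vis.length = n →
      (∀ x ∈ q, x < n ∧ vis.getD x false = true) →
      (∀ u', vis.getD u' false = true → u' ∉ q →
        ∀ i, i < n → ((g.getD i []).getD u' 0 == 1) = true → vis.getD i false = true) →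
      q.length + 2 * (n - vis.count true) ≤ fuel →
      ∀ u', (pvBfs g n fuel vis q).getD u' false = true →
        ∀ i, i < n → ((g.getD i []).getD u' 0 == 1) = true →
          (pvBfs g n fuel vis q).getD i false = true := by
  intro fuel
  induction fuel with
  | zero =>
    intro vis q hlen hq hP hmu
    cases q with
    | nil =>
      intro u' hu' i hi hE
      simp [pvBfs] at hu' ⊢
      exact hP u' hu' (by simp) i hi hE
    | cons x xs =>
      exfalso
      rw [List.length_cons] at hmu
      omega
  | succ fuel ih =>
    intro vis q hlen hq hP hmu
    cases q with
    | nil =>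
      intro u' hu' i hi hE
      simp [pvBfs] at hu' ⊢
      exact hP u' hu' (by simp) i hi hE
    | cons u rest =>
      rw [pvBfs]
      have hrange : ∀ i ∈ List.range n, i < vis.length := by simp [hlen]
      have hrq : ∀ y ∈ rest, vis.getD y false = true := fun y hy => (hq y (by simp [hy])).2
      refine ih (pvBfsInner g u vis rest (List.range n)).1
        (pvBfsInner g u vis rest (List.range n)).2 ?_ ?_ ?_ ?_
      · rw [innerA_len]; exact hlen
      · intro x hx
        refine ⟨?_, innerA_queue_vis g u _ _ _ hrange hrq x hx⟩
        rcases innerA_queue_sub g u _ _ _ x hx with h' | h'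
        · exact (hq x (by simp [h'])).1
        · exact List.mem_range.mp h'
      · intro u2 h2 hn2 i hi hE
        rcases innerA_new_in_queue g u _ _ _ u2 h2 with hold | hmem
        · by_cases hu2 : u2 = u
          · rw [hu2] at hE
            exact innerA_closes g u _ _ _ hrange i (List.mem_range.mpr hi) hE
          · have hnr : u2 ∉ rest := by
              intro hr
              obtain ⟨ext, hext⟩ := innerA_queue_prefix g u (List.range n) vis rest
              exact hn2 (by rw [hext]; exact List.mem_append.mpr (Or.inl hr))
            have hnc : u2 ∉ u :: rest := by simp [hu2, hnr]
            exact innerA_mono g u _ _ _ _ (hP u2 hold hnc i hi hE)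
        · exact absurd hmem hn2
      · have hcntEq := innerA_count g u (List.range n) vis rest hrange
        have h1 : (pvBfsInner g u vis rest (List.range n)).1.count true
            ≤ (pvBfsInner g u vis rest (List.range n)).1.length := List.count_le_length
        rw [innerA_len, hlen] at h1
        have h2 : rest.length ≤ (pvBfsInner g u vis rest (List.range n)).2.length := by
          obtain ⟨ext, hext⟩ := innerA_queue_prefix g u (List.range n) vis rest
          rw [hext]; simp
        rw [List.length_cons] at hmu
        omega

-- ---- B's inner loops ----
theorem rowB_len (g : List (List Int)) (i : Nat) :
    ∀ (us : List Nat) (st : List Bool × Bool), (pvRelaxRow g i st us).1.length = st.1.length := by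
  intro us
  induction us with
  | nil => intro st; simp [pvRelaxRow]
  | cons u us ih =>
    intro st
    by_cases hc : (((g.getD i []).getD u 0 == 1) && (st.1.getD u false) && !(st.1.getD i false)) = true
    · rw [pvRelaxRow, if_pos hc, ih]; simp
    · rw [pvRelaxRow, if_neg hc]; exact ih st

theorem rowB_mono (g : List (List Int)) (i : Nat) :
    ∀ (us : List Nat) (st : List Bool × Bool) (v : Nat),
      st.1.getD v false = true → (pvRelaxRow g i st us).1.getD v false = true := by
  intro us
  induction us with
  | nil => intro st v h; simpa [pvRelaxRow] using h
  | cons u us ih =>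
    intro st v h
    by_cases hc : (((g.getD i []).getD u 0 == 1) && (st.1.getD u false) && !(st.1.getD i false)) = true
    · rw [pvRelaxRow, if_pos hc]
      exact ih _ _ ((pv_getD_set_true_iff _ _ _).mpr (Or.inr h))
    · rw [pvRelaxRow, if_neg hc]; exact ih st v h

theorem rowB_flagmono (g : List (List Int)) (i : Nat) :
    ∀ (us : List Nat) (st : List Bool × Bool), st.2 = true → (pvRelaxRow g i st us).2 = true := by
  intro us
  induction us with
  | nil => intro st h; simpa [pvRelaxRow] using h
  | cons u us ih =>
    intro st h
    by_cases hc : (((g.getD i []).getD u 0 == 1) && (st.1.getD u false) && !(st.1.getD i false)) = true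
    · rw [pvRelaxRow, if_pos hc]; exact ih _ rfl
    · rw [pvRelaxRow, if_neg hc]; exact ih st h

theorem rowB_sound (g : List (List Int)) (i : Nat) :
    ∀ (us : List Nat) (st : List Bool × Bool) (T : Nat → Prop),
      (∀ u ∈ us, ((g.getD i []).getD u 0 == 1) = true → T u → T i) →
      (∀ v, st.1.getD v false = true → T v) →
      ∀ v, (pvRelaxRow g i st us).1.getD v false = true → T v := by
  intro us
  induction us with
  | nil => intro st T _ hvis v h; simp [pvRelaxRow] at h; exact hvis v h
  | cons u us ih =>
    intro st T hT hvis v h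
    by_cases hc : (((g.getD i []).getD u 0 == 1) && (st.1.getD u false) && !(st.1.getD i false)) = true
    · rw [pvRelaxRow, if_pos hc] at h
      have hE : ((g.getD i []).getD u 0 == 1) = true :=
        (Bool.and_eq_true _ _ ▸ (Bool.and_eq_true _ _ ▸ hc).1).1
      have hru : st.1.getD u false = true :=
        (Bool.and_eq_true _ _ ▸ (Bool.and_eq_true _ _ ▸ hc).1).2
      have hTi : T i := hT u (by simp) hE (hvis u hru)
      refine ih _ T (fun w hw hEw hTw => hT w (by simp [hw]) hEw hTw) ?_ v h
      intro w hw
      rcases (pv_getD_set_true_iff _ _ _).mp hw with ⟨hv, _⟩ | h''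
      · subst hv; exact hTi
      · exact hvis w h''
    · rw [pvRelaxRow, if_neg hc] at h
      exact ih st T (fun w hw hEw hTw => hT w (by simp [hw]) hEw hTw) hvis v h

theorem rowB_unchanged (g : List (List Int)) (i : Nat) :
    ∀ (us : List Nat) (st : List Bool × Bool), (pvRelaxRow g i st us).2 = false →
      (pvRelaxRow g i st us).1 = st.1 ∧ (pvRelaxRow g i st us).2 = st.2 ∧
      ∀ u ∈ us, ((g.getD i []).getD u 0 == 1) = true →
        st.1.getD u false = true → st.1.getD i false = true := by
  intro us
  induction us with
  | nil => intro st _; exact ⟨by simp [pvRelaxRow], by simp [pvRelaxRow], by simp⟩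
  | cons u us ih =>
    intro st h
    by_cases hc : (((g.getD i []).getD u 0 == 1) && (st.1.getD u false) && !(st.1.getD i false)) = true
    · rw [pvRelaxRow, if_pos hc] at h
      have : (pvRelaxRow g i (st.1.set i true, true) us).2 = true := rowB_flagmono g i us _ rfl
      rw [this] at h
      exact absurd h (by simp)
    · rw [pvRelaxRow, if_neg hc] at h ⊢
      obtain ⟨h1, h2, h3⟩ := ih st h
      refine ⟨h1, h2, ?_⟩
      intro w hw hEw hrw
      rcases List.mem_cons.mp hw with hwu | hwm
      · subst hwu
        by_contra hri
        have hrf : st.1.getD i false = false := Bool.not_eq_true _ ▸ hri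
        apply hc
        rw [Bool.and_eq_true, Bool.and_eq_true]
        exact ⟨⟨hEw, hrw⟩, by rw [hrf]; rfl⟩
      · exact h3 w hwm hEw hrw

theorem rowB_cnt_mono (g : List (List Int)) (i : Nat) :
    ∀ (us : List Nat) (st : List Bool × Bool),
      st.1.count true ≤ (pvRelaxRow g i st us).1.count true := by
  intro us
  induction us with
  | nil => intro st; simp [pvRelaxRow]
  | cons u us ih =>
    intro st
    by_cases hc : (((g.getD i []).getD u 0 == 1) && (st.1.getD u false) && !(st.1.getD i false)) = true
    · rw [pvRelaxRow, if_pos hc]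
      exact le_trans (pv_cnt_set_le st.1 i) (ih (st.1.set i true, true))
    · rw [pvRelaxRow, if_neg hc]; exact ih st

theorem rowB_cnt_strict (g : List (List Int)) (i : Nat) :
    ∀ (us : List Nat) (st : List Bool × Bool), i < st.1.length →
      st.2 = false → (pvRelaxRow g i st us).2 = true →
      st.1.count true < (pvRelaxRow g i st us).1.count true := by
  intro us
  induction us with
  | nil =>
    intro st _ h0 h1
    simp [pvRelaxRow] at h1
    rw [h0] at h1
    exact absurd h1 (by simp)
  | cons u us ih =>
    intro st hi h0 h1
    by_cases hc : (((g.getD i []).getD u 0 == 1) && (st.1.getD u false) && !(st.1.getD i false)) = true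
    · rw [pvRelaxRow, if_pos hc]
      have hrf : st.1.getD i false = false := by
        have := (Bool.and_eq_true _ _ ▸ hc).2
        simpa [List.getD] using this
      have heq := pv_cnt_set_eq st.1 i hi hrf
      have hle := rowB_cnt_mono g i us (st.1.set i true, true)
      simp only at hle
      omega
    · rw [pvRelaxRow, if_neg hc] at h1 ⊢
      exact ih st hi h0 h1

theorem sweepB_len (g : List (List Int)) (n : Nat) :
    ∀ (is : List Nat) (st : List Bool × Bool), (pvSweep g n st is).1.length = st.1.length := by
  intro is
  induction is with
  | nil => intro st; simp [pvSweep]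
  | cons i is ih =>
    intro st
    rw [pvSweep, ih, rowB_len]

theorem sweepB_mono (g : List (List Int)) (n : Nat) :
    ∀ (is : List Nat) (st : List Bool × Bool) (v : Nat),
      st.1.getD v false = true → (pvSweep g n st is).1.getD v false = true := by
  intro is
  induction is with
  | nil => intro st v h; simpa [pvSweep] using h
  | cons i is ih =>
    intro st v h
    rw [pvSweep]
    exact ih _ _ (rowB_mono g i _ _ _ h)

theorem sweepB_sound (g : List (List Int)) (n : Nat) :
    ∀ (is : List Nat) (st : List Bool × Bool) (T : Nat → Prop),
      pvGoodT g n T → (∀ i ∈ is, i < n) →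
      (∀ v, st.1.getD v false = true → T v) →
      ∀ v, (pvSweep g n st is).1.getD v false = true → T v := by
  intro is
  induction is with
  | nil => intro st T _ _ hvis v h; simp [pvSweep] at h; exact hvis v h
  | cons i is ih =>
    intro st T hGood hin hvis v h
    rw [pvSweep] at h
    refine ih _ T hGood (fun j hj => hin j (by simp [hj])) ?_ v h
    exact rowB_sound g i _ _ T
      (fun u hu hE hTu => hGood i u (hin i (by simp)) (List.mem_range.mp hu) hE hTu) hvis

theorem sweepB_unchanged (g : List (List Int)) (n : Nat) :
    ∀ (is : List Nat) (st : List Bool × Bool), (pvSweep g n st is).2 = false →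
      (pvSweep g n st is).1 = st.1 ∧ (pvSweep g n st is).2 = st.2 ∧
      ∀ i ∈ is, ∀ u, u < n → ((g.getD i []).getD u 0 == 1) = true →
        st.1.getD u false = true → st.1.getD i false = true := by
  intro is
  induction is with
  | nil => intro st _; exact ⟨by simp [pvSweep], by simp [pvSweep], by simp⟩
  | cons i is ih =>
    intro st h
    rw [pvSweep] at h ⊢
    obtain ⟨hA, hB, hC⟩ := ih _ h
    have hr2 : (pvRelaxRow g i st (List.range n)).2 = false := by rw [hB] at h; exact h
    obtain ⟨ha, hb, hcl⟩ := rowB_unchanged g i (List.range n) st hr2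
    refine ⟨hA.trans ha, hB.trans hb, ?_⟩
    intro j hj u hu hE hru
    rcases List.mem_cons.mp hj with hji | hjm
    · subst hji
      exact hcl u (List.mem_range.mpr hu) hE hru
    · have := hC j hjm u hu hE (by rw [ha]; exact hru)
      rw [ha] at this
      exact this

theorem sweepB_cnt_mono (g : List (List Int)) (n : Nat) :
    ∀ (is : List Nat) (st : List Bool × Bool),
      st.1.count true ≤ (pvSweep g n st is).1.count true := by
  intro is
  induction is with
  | nil => intro st; simp [pvSweep]
  | cons i is ih =>
    intro st
    rw [pvSweep]
    exact le_trans (rowB_cnt_mono g i _ st) (ih _)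

theorem sweepB_cnt_strict (g : List (List Int)) (n : Nat) :
    ∀ (is : List Nat) (st : List Bool × Bool), (∀ i ∈ is, i < st.1.length) →
      st.2 = false → (pvSweep g n st is).2 = true →
      st.1.count true < (pvSweep g n st is).1.count true := by
  intro is
  induction is with
  | nil =>
    intro st _ h0 h1
    simp [pvSweep] at h1
    rw [h0] at h1
    exact absurd h1 (by simp)
  | cons i is ih =>
    intro st hlen h0 h1
    rw [pvSweep] at h1 ⊢
    by_cases hr : (pvRelaxRow g i st (List.range n)).2 = true
    · have hstrict := rowB_cnt_strict g i (List.range n) st (hlen i (by simp)) h0 hr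
      exact lt_of_lt_of_le hstrict (sweepB_cnt_mono g n is _)
    · have hr2 : (pvRelaxRow g i st (List.range n)).2 = false := Bool.not_eq_true _ ▸ hr
      obtain ⟨ha, hb, _⟩ := rowB_unchanged g i (List.range n) st hr2
      have := ih (pvRelaxRow g i st (List.range n))
        (fun j hj => by rw [rowB_len]; exact hlen j (by simp [hj]))
        (hb.trans h0) h1
      rw [ha] at this
      exact this

-- ---- B's fixpoint loop ----
theorem fixB_len (g : List (List Int)) (n : Nat) :
    ∀ (fuel : Nat) (reach : List Bool), (pvFix g n fuel reach).length = reach.length := by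
  intro fuel
  induction fuel with
  | zero => intro reach; simp [pvFix]
  | succ fuel ih =>
    intro reach
    rw [pvFix]
    by_cases hb : (pvSweep g n (reach, false) (List.range n)).2 = true
    · rw [if_pos hb, ih, sweepB_len]
    · rw [if_neg hb, sweepB_len]

theorem fixB_mono (g : List (List Int)) (n : Nat) :
    ∀ (fuel : Nat) (reach : List Bool) (v : Nat),
      reach.getD v false = true → (pvFix g n fuel reach).getD v false = true := by
  intro fuel
  induction fuel with
  | zero => intro reach v h; simpa [pvFix] using h
  | succ fuel ih =>
    intro reach v h
    rw [pvFix]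
    by_cases hb : (pvSweep g n (reach, false) (List.range n)).2 = true
    · rw [if_pos hb]
      exact ih _ _ (sweepB_mono g n _ _ _ h)
    · rw [if_neg hb]
      exact sweepB_mono g n _ _ _ h

theorem fixB_sound (g : List (List Int)) (n : Nat) :
    ∀ (fuel : Nat) (reach : List Bool) (T : Nat → Prop),
      pvGoodT g n T → (∀ v, reach.getD v false = true → T v) →
      ∀ v, (pvFix g n fuel reach).getD v false = true → T v := by
  intro fuel
  induction fuel with
  | zero => intro reach T _ hvis v h; simp [pvFix] at h; exact hvis v h
  | succ fuel ih =>
    intro reach T hGood hvis v h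
    rw [pvFix] at h
    have hsnd := sweepB_sound g n (List.range n) (reach, false) T hGood
      (fun i hi => List.mem_range.mp hi) hvis
    by_cases hb : (pvSweep g n (reach, false) (List.range n)).2 = true
    · rw [if_pos hb] at h
      exact ih _ T hGood hsnd v h
    · rw [if_neg hb] at h
      exact hsnd v h

theorem fixB_closed (g : List (List Int)) (n : Nat) :
    ∀ (fuel : Nat) (reach : List Bool), reach.length = n → n ≤ fuel + reach.count true →
      pvGoodT g n (fun v => (pvFix g n fuel reach).getD v false = true) := by
  intro fuel
  induction fuel with
  | zero =>
    intro reach hlen hn i u hi hu hE hTu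
    have hful := pv_cnt_full reach (by omega) i (by rw [hlen]; exact hi)
    simpa [pvFix] using hful
  | succ fuel ih =>
    intro reach hlen hn
    by_cases hb : (pvSweep g n (reach, false) (List.range n)).2 = true
    · have heq : pvFix g n (fuel+1) reach
          = pvFix g n fuel (pvSweep g n (reach, false) (List.range n)).1 := by
        rw [pvFix, if_pos hb]
      have hlen' : (pvSweep g n (reach, false) (List.range n)).1.length = n := by
        rw [sweepB_len]; exact hlen
      have hstrict : reach.count true < (pvSweep g n (reach, false) (List.range n)).1.count true :=
        sweepB_cnt_strict g n (List.range n) (reach, false)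
          (fun i hi => by simpa [hlen] using List.mem_range.mp hi) rfl hb
      have hcle : (pvSweep g n (reach, false) (List.range n)).1.count true
          ≤ (pvSweep g n (reach, false) (List.range n)).1.length := List.count_le_length
      rw [hlen'] at hcle
      have key := ih (pvSweep g n (reach, false) (List.range n)).1 hlen' (by omega)
      intro i u hi hu hE hTu
      rw [heq] at hTu ⊢
      exact key i u hi hu hE hTu
    · have hb' : (pvSweep g n (reach, false) (List.range n)).2 = false := Bool.not_eq_true _ ▸ hb
      obtain ⟨ha, _, hcl⟩ := sweepB_unchanged g n (List.range n) (reach, false) hb'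
      have heq : pvFix g n (fuel+1) reach = reach := by
        rw [pvFix, if_neg hb]; exact ha
      intro i u hi hu hE hTu
      rw [heq] at hTu ⊢
      exact hcl i (List.mem_range.mpr hi) u hu hE hTu

-- ---- the two closures agree ----
theorem pv_main (g : List (List Int)) (c : Nat) (hc : c < g.length) :
    pvBfs g g.length (2 * g.length + 1) ((List.replicate g.length false).set c true) [c]
      = pvFix g g.length (g.length + 1) ((List.replicate g.length false).set c true) := by
  have hinitlen : ((List.replicate g.length false).set c true).length = g.length := by simp
  have hinitc : ((List.replicate g.length false).set c true).getD c false = true :=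
    (pv_getD_set_true_iff _ _ _).mpr (Or.inl ⟨rfl, by simpa using hc⟩)
  have hinit_only : ∀ v, ((List.replicate g.length false).set c true).getD v false = true → v = c := by
    intro v hv
    rcases (pv_getD_set_true_iff _ _ _).mp hv with ⟨h1, _⟩ | h2
    · exact h1
    · rw [pv_getD_replicate] at h2; exact absurd h2 (by simp)
  have hcnt : ((List.replicate g.length false).set c true).count true = 1 := by
    have h0 : (List.replicate g.length false).count true = 0 := by rw [List.count_replicate]; simp
    have h1 := pv_cnt_set_eq (List.replicate g.length false) c (by rw [List.length_replicate]; exact hc)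
      (by rw [pv_getD_replicate])
    rw [h0] at h1
    exact h1
  have hq1 : ∀ x ∈ ([c] : List Nat), x < g.length ∧
      ((List.replicate g.length false).set c true).getD x false = true := by
    intro x hx
    have hxc : x = c := by simpa using hx
    subst hxc
    exact ⟨hc, hinitc⟩
  have hP0 : ∀ u', ((List.replicate g.length false).set c true).getD u' false = true →
      u' ∉ ([c] : List Nat) → ∀ i, i < g.length →
      ((g.getD i []).getD u' 0 == 1) = true →
      ((List.replicate g.length false).set c true).getD i false = true := by
    intro u' hu' hnin i hi hE
    exact absurd (show u' ∈ ([c] : List Nat) from by rw [hinit_only u' hu']; simp) hnin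
  have hmu : ([c] : List Nat).length
      + 2 * (g.length - ((List.replicate g.length false).set c true).count true)
      ≤ 2 * g.length + 1 := by
    rw [hcnt]
    simp only [List.length_cons, List.length_nil]
    omega
  have hGoodB : pvGoodT g g.length
      (fun v => (pvFix g g.length (g.length + 1)
        ((List.replicate g.length false).set c true)).getD v false = true) :=
    fixB_closed g g.length (g.length + 1) _ hinitlen (by omega)
  have hGoodA : pvGoodT g g.length
      (fun v => (pvBfs g g.length (2 * g.length + 1)
        ((List.replicate g.length false).set c true) [c]).getD v false = true) := by
    intro i u hi hu hE hTu
    exact bfsA_closed g g.length (2 * g.length + 1) _ [c] hinitlen hq1 hP0 hmu u hTu i hi hE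
  have hAsub : ∀ v, (pvBfs g g.length (2 * g.length + 1)
      ((List.replicate g.length false).set c true) [c]).getD v false = true →
      (pvFix g g.length (g.length + 1)
        ((List.replicate g.length false).set c true)).getD v false = true := by
    refine bfsA_sound g g.length (2 * g.length + 1) _ [c] _ hGoodB hinitlen hq1 ?_
    intro v hv
    rw [hinit_only v hv]
    exact fixB_mono g g.length _ _ c hinitc
  have hBsub : ∀ v, (pvFix g g.length (g.length + 1)
      ((List.replicate g.length false).set c true)).getD v false = true →
      (pvBfs g g.length (2 * g.length + 1)
        ((List.replicate g.length false).set c true) [c]).getD v false = true := by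
    refine fixB_sound g g.length (g.length + 1) _ _ hGoodA ?_
    intro v hv
    rw [hinit_only v hv]
    exact bfsA_mono g g.length _ _ [c] c hinitc
  have hVlen := bfsA_len g g.length (2 * g.length + 1)
    ((List.replicate g.length false).set c true) [c]
  have hRlen := fixB_len g g.length (g.length + 1)
    ((List.replicate g.length false).set c true)
  apply List.ext_getElem
  · rw [hVlen, hRlen]
  · intro i h1 h2
    have hgd : (pvBfs g g.length (2 * g.length + 1)
        ((List.replicate g.length false).set c true) [c]).getD i false
        = (pvFix g g.length (g.length + 1)
          ((List.replicate g.length false).set c true)).getD i false := by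
      cases hv : (pvBfs g g.length (2 * g.length + 1)
          ((List.replicate g.length false).set c true) [c]).getD i false with
      | true => rw [hAsub i hv]
      | false =>
        cases hr : (pvFix g g.length (g.length + 1)
            ((List.replicate g.length false).set c true)).getD i false with
        | false => rfl
        | true => exact absurd (hBsub i hr) (by simp only [Bool.not_eq_true]; exact hv)
    rw [List.getD_eq_getElem _ false h1, List.getD_eq_getElem _ false h2] at hgd
    exact hgd

-- ===== VERDICT (by name: the statement is the Claim_ definition above) =====
theorem has_uni_exit_spec : Claim_equal_has_uni_exit := by
  intro graph _hd _hp
  show has_uni_exit graph = has_uni_exit_alt graph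
  unfold has_uni_exit has_uni_exit_alt
  simp only [pvIsExit]
  rcases hcand : (List.range graph.length).filter (fun i => ((graph.getD i []).sum == 0))
    with - | ⟨c, - | ⟨c2, rest⟩⟩
  · simp [pvCandLoop]
  · have hcmem : c ∈ (List.range graph.length).filter (fun i => ((graph.getD i []).sum == 0)) := by
      rw [hcand]; simp
    have hclt : c < graph.length := List.mem_range.mp (List.mem_filter.mp hcmem).1
    simp only [List.length_cons, List.length_nil, List.headD_cons]
    rw [if_neg (by omega), if_neg (by simp)]
    simp only [pvCandLoop]
    rw [pv_main graph c hclt, pvSum_eq_all]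
    cases h : (pvFix graph graph.length (graph.length + 1)
        ((List.replicate graph.length false).set c true)).all id <;> simp
  · simp only [List.length_cons]
    rw [if_pos (by omega), if_pos (by simp)]
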